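-- pv_equiv track=rewrite | github.com/wave-duality/stack-sort | stack sorting.py | containsbad123
-- ===== SOURCE A (Python) =====
-- def containsbad123(p):
--     for i in range(0, len(p)-2):
--       for j in range(i+1, len(p)-1):
--         for k in range(j+1, len(p)):
--           if p[k] > p[j] and p[j] > p[i]:
--               #condition 1
--               val = 0
--               for m in range(0, i):
--                 if p[m] > p[j] and p[m] < p[k]:
--                   val = 1
--               for n in range(j+1, k):
--                 if p[n] < p[i]:
--                   val = 1
--               if val == 0:
--                 return True
--     return False
-- ===== SOURCE B (Python) =====
-- def containsbad123(p):
--     n = len(p)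
--     for j in range(1, n - 1):
--         for k in range(j + 1, n):
--             if p[k] <= p[j]:
--                 continue
--             # i must lie before the first index m with p[j] < p[m] < p[k] (inclusive)
--             f = j
--             for m in range(j):
--                 if p[j] < p[m] < p[k]:
--                     f = m
--                     break
--             lo = min(p[j + 1:k], default=None)
--             for i in range(min(j, f + 1)):
--                 if p[i] < p[j] and (lo is None or p[i] <= lo):
--                     return True
--     return False
-- ===== Notes on version B (the rewrite author's own statement) =====
-- stated objective: faster
-- what changed: Replaced A's quadruple loop (for every triple i<j<k two full inner verification scans) by a pair loop over (j,k) that finds the first blocking prefix index once (with an early break), takes the minimum of the slice p[j+1:k] once, and then scans candidate i a single time.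
import Mathlib
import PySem

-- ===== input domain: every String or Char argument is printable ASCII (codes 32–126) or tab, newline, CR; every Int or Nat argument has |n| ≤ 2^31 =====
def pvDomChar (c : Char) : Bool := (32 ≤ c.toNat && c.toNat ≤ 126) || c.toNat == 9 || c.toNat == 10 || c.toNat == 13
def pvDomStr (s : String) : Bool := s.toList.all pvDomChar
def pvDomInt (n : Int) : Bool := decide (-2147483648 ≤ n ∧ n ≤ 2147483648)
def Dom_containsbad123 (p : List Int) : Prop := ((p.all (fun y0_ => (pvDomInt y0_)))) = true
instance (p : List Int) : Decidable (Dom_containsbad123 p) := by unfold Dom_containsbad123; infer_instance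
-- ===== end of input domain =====

-- B replaces A's O(n^4) quadruple scan by a pair loop over (j,k) with a first-violator
-- search, a slice minimum and a single i-scan (O(n^3)); equal return value on all inputs.

-- ===== PORT A =====
-- all loop indices are in-range, so p.getD _ 0 is exactly Python's p[_]
def containsbad123 (p : List Int) : Bool :=
  (List.range (p.length - 2)).any (fun i =>
    (List.range' (i+1) (p.length - 1 - (i+1))).any (fun j =>
      (List.range' (j+1) (p.length - (j+1))).any (fun k =>
        if p.getD k 0 > p.getD j 0 ∧ p.getD j 0 > p.getD i 0 then
          let val1 : Int := (List.range i).foldl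
            (fun val m => if p.getD m 0 > p.getD j 0 ∧ p.getD m 0 < p.getD k 0 then 1 else val) 0
          let val2 : Int := (List.range' (j+1) (k - (j+1))).foldl
            (fun val t => if p.getD t 0 < p.getD i 0 then 1 else val) val1
          val2 == 0
        else false)))

-- ===== PORT B =====
-- the break-loop for f is Python's first match: find?; min(p[j+1:k], default=None) is min? of the slice
def containsbad123_alt (p : List Int) : Bool :=
  (List.range' 1 (p.length - 1 - 1)).any (fun j =>
    (List.range' (j+1) (p.length - (j+1))).any (fun k =>
      if p.getD k 0 ≤ p.getD j 0 then false
      else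
        let f : Nat := ((List.range j).find?
          (fun m => decide (p.getD j 0 < p.getD m 0 ∧ p.getD m 0 < p.getD k 0))).getD j
        let lo : Option Int := PySem.List.min?
          (PySem.List.slice p (some ((j+1 : Nat) : Int)) (some ((k : Nat) : Int))) (fun x => x)
        (List.range (min j (f+1))).any (fun i =>
          decide (p.getD i 0 < p.getD j 0) &&
            (match lo with | none => true | some v => decide (p.getD i 0 ≤ v)))))

-- ===== PRECONDITION & SPEC =====
def Spec_containsbad123 (p : List Int) (out : Bool) : Prop := out = containsbad123_alt p
instance (p : List Int) (out : Bool) : Decidable (Spec_containsbad123 p out) := by unfold Spec_containsbad123; infer_instance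

-- ===== CLAIM (what is proved, stated in full; the proofs are below) =====
def Claim_equal_containsbad123 : Prop := ∀ (p : List Int), Dom_containsbad123 p → Spec_containsbad123 p (containsbad123 p)

-- ===== LEMMAS AND PROOFS =====

-- the common characterisation: an increasing triple i<j<k with no earlier "blocking" m and
-- no smaller element strictly between j and k
def BadAt (p : List Int) (i j k : Nat) : Prop :=
  p.getD k 0 > p.getD j 0 ∧ p.getD j 0 > p.getD i 0 ∧
  (∀ m, m < i → ¬(p.getD m 0 > p.getD j 0 ∧ p.getD m 0 < p.getD k 0)) ∧
  (∀ t, j < t → t < k → ¬(p.getD t 0 < p.getD i 0))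

def Bad (p : List Int) : Prop := ∃ i j k, i < j ∧ j < k ∧ k < p.length ∧ BadAt p i j k


lemma foldl_flag {α : Type} (c : α → Prop) [DecidablePred c] :
    ∀ (l : List α) (a : Int),
      l.foldl (fun v x => if c x then 1 else v) a = if ∃ x ∈ l, c x then 1 else a := by
  intro l
  induction l with
  | nil => intro a; simp
  | cons x l ih =>
    intro a
    simp only [List.foldl_cons, ih]
    by_cases hx : c x <;> by_cases hl : (∃ y ∈ l, c y) <;> simp [hx, hl]

lemma Abody (p : List Int) (i j k : Nat) :
    ((if p.getD k 0 > p.getD j 0 ∧ p.getD j 0 > p.getD i 0 then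
        let val1 : Int := (List.range i).foldl
          (fun val m => if p.getD m 0 > p.getD j 0 ∧ p.getD m 0 < p.getD k 0 then 1 else val) 0
        let val2 : Int := (List.range' (j+1) (k - (j+1))).foldl
          (fun val t => if p.getD t 0 < p.getD i 0 then 1 else val) val1
        val2 == 0
      else false) = true) ↔ BadAt p i j k := by
  unfold BadAt
  by_cases h : (p.getD k 0 > p.getD j 0 ∧ p.getD j 0 > p.getD i 0)
  · rw [if_pos h]
    simp only [foldl_flag, List.mem_range, List.mem_range'_1, beq_iff_eq]
    constructor
    · intro hv
      split_ifs at hv with hE2 hE1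
      · exact absurd hv (by norm_num)
      · exact absurd hv (by norm_num)
      · refine ⟨h.1, h.2, ?_, ?_⟩
        · intro m hm hc
          exact hE1 ⟨m, hm, hc⟩
        · intro t ht1 ht2 hc
          exact hE2 ⟨t, List.mem_range'_1.mpr ⟨by omega, by omega⟩, hc⟩
    · rintro ⟨-, -, hm, ht⟩
      rw [if_neg, if_neg]
      · rintro ⟨m, hm', hc⟩
        exact hm m hm' hc
      · rintro ⟨t, htm, hc⟩
        have := List.mem_range'_1.mp htm
        exact ht t (by omega) (by omega) hc
  · rw [if_neg h]
    simp only [Bool.false_eq_true, false_iff]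
    rintro ⟨h1, h2, -⟩
    exact h ⟨h1, h2⟩

lemma A_iff (p : List Int) : containsbad123 p = true ↔ Bad p := by
  unfold containsbad123 Bad
  simp only [List.any_eq_true, List.mem_range, List.mem_range'_1, Abody]
  constructor
  · rintro ⟨i, hi, j, hj, k, hk, hb⟩
    exact ⟨i, j, k, by omega, by omega, by omega, hb⟩
  · rintro ⟨i, j, k, h1, h2, h3, hb⟩
    exact ⟨i, by omega, j, by omega, k, by omega, hb⟩

lemma Bbody (p : List Int) (j k : Nat) (hjk : j < k) (hk : k < p.length) :
    ((if p.getD k 0 ≤ p.getD j 0 then false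
      else
        let f : Nat := ((List.range j).find?
          (fun m => decide (p.getD j 0 < p.getD m 0 ∧ p.getD m 0 < p.getD k 0))).getD j
        let lo : Option Int := PySem.List.min?
          (PySem.List.slice p (some ((j+1 : Nat) : Int)) (some ((k : Nat) : Int))) (fun x => x)
        (List.range (min j (f+1))).any (fun i =>
          decide (p.getD i 0 < p.getD j 0) &&
            (match lo with | none => true | some v => decide (p.getD i 0 ≤ v)))) = true)
      ↔ ∃ i, i < j ∧ BadAt p i j k := by
  by_cases hc : p.getD k 0 ≤ p.getD j 0
  · rw [if_pos hc]
    constructor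
    · intro hv; exact absurd hv (by simp)
    · rintro ⟨i, -, h1, -⟩
      exact absurd h1 (not_lt.mpr hc)
  · rw [if_neg hc]
    rw [PySem.List.slice_natCast]
    simp only [List.any_eq_true, List.mem_range, Bool.and_eq_true, decide_eq_true_eq]
    constructor
    · rintro ⟨i, hi, hgij, hlo⟩
      refine ⟨i, by omega, not_le.mp hc, hgij, ?_, ?_⟩
      · -- no blocking m before i
        intro m hm hcm
        rcases hf : (List.range j).find?
            (fun m => decide (p.getD j 0 < p.getD m 0 ∧ p.getD m 0 < p.getD k 0)) with _ | m0
        · exact absurd (by simpa using (List.find?_eq_none.mp hf m (List.mem_range.mpr (by omega))))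
            (by simpa using hcm)
        · rw [hf] at hi
          simp only [Option.getD_some] at hi
          obtain ⟨-, u, hu, hum, hfirst⟩ := List.find?_eq_some_iff_getElem.mp hf
          rw [List.getElem_range] at hum
          have h2 := hfirst m (by omega)
          rw [List.getElem_range] at h2
          simp only [Bool.not_eq_eq_eq_not, Bool.not_true, decide_eq_false_iff_not] at h2
          exact h2 ⟨hcm.1, hcm.2⟩
      · -- no element below p[i] strictly between j and k
        intro t ht1 ht2 hlt
        rcases hlov : PySem.List.min? ((p.drop (j+1)).take (k - (j+1))) (fun x => x) with _ | v
        · have hnil := (PySem.List.min?_eq_none_iff _ _).mp hlov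
          have hlen : ((p.drop (j+1)).take (k - (j+1))).length = 0 := by rw [hnil]; rfl
          simp only [List.length_take, List.length_drop] at hlen
          omega
        · rw [hlov] at hlo
          simp only [decide_eq_true_eq] at hlo
          have hlen : t - (j+1) < ((p.drop (j+1)).take (k - (j+1))).length := by
            simp only [List.length_take, List.length_drop]; omega
          have hmem : p.getD t 0 ∈ (p.drop (j+1)).take (k - (j+1)) := by
            have hel : ((p.drop (j+1)).take (k - (j+1)))[t - (j+1)] = p.getD t 0 := by
              rw [List.getElem_take, List.getElem_drop, List.getD_eq_getElem p 0 (by omega)]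
              congr 1; omega
            rw [← hel]
            exact List.getElem_mem hlen
          have hmin := PySem.List.min?_isMin hlov (p.getD t 0) hmem
          simp only at hmin
          omega
    · rintro ⟨i, hij, -, hgij, hm, ht⟩
      refine ⟨i, ?_, hgij, ?_⟩
      · -- i < min j (f+1): i cannot come after the first blocking index
        rcases hf : (List.range j).find?
            (fun m => decide (p.getD j 0 < p.getD m 0 ∧ p.getD m 0 < p.getD k 0)) with _ | m0
        · simp only [Option.getD_none]; omega
        · simp only [Option.getD_some]
          have hp := List.find?_some hf
          simp only [decide_eq_true_eq] at hp
          have hni : ¬ m0 < i := fun hlt => hm m0 hlt ⟨hp.1, hp.2⟩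
          omega
      · rcases hlov : PySem.List.min? ((p.drop (j+1)).take (k - (j+1))) (fun x => x) with _ | v
        · rfl
        · simp only [decide_eq_true_eq]
          have hmem := PySem.List.min?_mem hlov
          obtain ⟨u, hu, huv⟩ := List.mem_iff_getElem.mp hmem
          have hulen := hu
          simp only [List.length_take, List.length_drop] at hulen
          have hval : p.getD (j+1+u) 0 = v := by
            rw [List.getD_eq_getElem p 0 (by omega)]
            rw [List.getElem_take, List.getElem_drop] at huv
            exact huv
          have hge := ht (j+1+u) (by omega) (by omega)
          omega

lemma B_iff (p : List Int) : containsbad123_alt p = true ↔ Bad p := by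
  unfold containsbad123_alt Bad
  simp only [List.any_eq_true, List.mem_range'_1]
  constructor
  · rintro ⟨j, hj, k, hk, hb⟩
    have hb' := (Bbody p j k (by omega) (by omega)).mp hb
    obtain ⟨i, hij, hbad⟩ := hb'
    exact ⟨i, j, k, hij, by omega, by omega, hbad⟩
  · rintro ⟨i, j, k, h1, h2, h3, hbad⟩
    refine ⟨j, by omega, k, by omega, ?_⟩
    exact (Bbody p j k (by omega) (by omega)).mpr ⟨i, h1, hbad⟩

-- ===== VERDICT (by name: the statement is the Claim_ definition above) =====
theorem containsbad123_spec : Claim_equal_containsbad123 := by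
  intro p _
  show containsbad123 p = containsbad123_alt p
  rw [Bool.eq_iff_iff, A_iff, B_iff]
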